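-- pv_equiv track=rewrite | github.com/Aditya88Gupta/Algorithms | Series/Series.py | generate
-- ===== SOURCE A (Python) =====
-- def generate(n,p,q):
--     diff = q-p
--     Min = 2
--     while diff>Min:
--         if diff%Min == 0 and diff/Min<n:
--             break
--         Min+=1
--     List = [q]
--     switch = True;
--     for i in range(1,n):
--         if List[i-1]-Min>=1 and switch:
--             List.append(List[i-1]-Min)
--         else:
--             switch = False
--             List.append(q+Min)
--             q += Min
--     return List
-- ===== SOURCE B (Python) =====
-- def generate(n, p, q):
--     # step factor: smallest divisor d of diff with 2 <= d < diff and diff < n*d,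
--     # found by trial division up to sqrt(diff); else diff itself (2 when diff <= 2)
--     diff = q - p
--     Min = 2
--     if diff > 2:
--         best = diff
--         d = 2
--         while d * d <= diff:
--             if diff % d == 0:
--                 if n * d > diff:
--                     best = d
--                     break
--                 c = diff // d
--                 if n * c > diff:
--                     best = min(best, c)
--             d += 1
--         Min = best
--     if n <= 1:
--         return [q]
--     k = min(n - 1, max(0, (q - 1) // Min))
--     return list(range(q, q - (k + 1) * Min, -Min)) + list(range(q + Min, q + (n - k) * Min, Min))
-- ===== Notes on version B (the rewrite author's own statement) =====
-- stated objective: faster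
-- what changed: B finds the step factor by trial division up to sqrt(diff) (tracking the smallest eligible cofactor) instead of A's linear scan over all of 2..diff, and emits the series as two arithmetic range objects instead of A's switch-flag append loop with list indexing.
import Mathlib
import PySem

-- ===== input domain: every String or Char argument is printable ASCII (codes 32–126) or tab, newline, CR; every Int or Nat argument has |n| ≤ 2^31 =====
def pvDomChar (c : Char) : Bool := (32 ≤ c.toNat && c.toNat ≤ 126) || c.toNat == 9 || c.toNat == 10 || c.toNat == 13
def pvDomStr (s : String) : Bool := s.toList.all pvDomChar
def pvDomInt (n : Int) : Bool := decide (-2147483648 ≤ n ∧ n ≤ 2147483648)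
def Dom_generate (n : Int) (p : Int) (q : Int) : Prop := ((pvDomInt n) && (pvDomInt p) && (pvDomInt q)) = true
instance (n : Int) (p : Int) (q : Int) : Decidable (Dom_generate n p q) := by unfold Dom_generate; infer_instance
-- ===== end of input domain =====

-- B replaces A's O(diff) linear scan for the step factor by trial division up to sqrt(diff)
-- and A's O(n) indexed append loop by a closed-form pair of arithmetic ranges (objective: faster).

-- ===== PORT A =====
-- Python: 'while diff>Min: if diff%Min == 0 and diff/Min<n: break; Min+=1'.
-- 'diff/Min' is Python float division, but it is only evaluated under 'diff%Min == 0',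
-- where it is an exact integer (|diff| ≤ 2^32 < 2^53), so floor division is exact there.
def genFindMin (n : Int) (diff : Int) (Min : Int) : Int :=
  if _h : diff > Min then
    if PySem.Int.mod diff Min = 0 ∧ PySem.Int.floordiv diff Min < n then Min
    else genFindMin n diff (Min + 1)
  else Min
termination_by (diff - Min).toNat
decreasing_by omega

-- 'List[i-1]' always succeeds in Python here (the list has i elements at step i),
-- so the default of pyGetD is never used.
def generate (n : Int) (p : Int) (q : Int) : List Int :=
  let diff := q - p
  let Min := genFindMin n diff 2
  let st := (PySem.List.pyRange 1 n).foldl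
    (fun (s : List Int × Bool × Int) i =>
      if 1 ≤ PySem.List.pyGetD s.1 (i - 1) 0 - Min ∧ s.2.1 = true then
        (s.1 ++ [PySem.List.pyGetD s.1 (i - 1) 0 - Min], s.2.1, s.2.2)
      else
        (s.1 ++ [s.2.2 + Min], false, s.2.2 + Min))
    ([q], true, q)
  st.1

-- ===== PORT B =====
-- termination helper for the trial-division loop (d*d ≤ diff bounds d by diff)
theorem pvLeMulSelf (d : Int) : d ≤ d * d := by
  by_cases h : d ≤ 0
  · exact le_trans h (mul_self_nonneg d)
  · nlinarith

def genAltFind (n : Int) (diff : Int) (d : Int) (best : Int) : Int :=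
  if _h : d * d ≤ diff then
    if PySem.Int.mod diff d = 0 then
      if n * d > diff then d
      else
        genAltFind n diff (d + 1)
          (if n * PySem.Int.floordiv diff d > diff then min best (PySem.Int.floordiv diff d) else best)
    else genAltFind n diff (d + 1) best
  else best
termination_by (diff + 1 - d).toNat
decreasing_by all_goals (have := pvLeMulSelf d; omega)

def generate_alt (n : Int) (p : Int) (q : Int) : List Int :=
  let diff := q - p
  let Min := if 2 < diff then genAltFind n diff 2 diff else 2
  if n ≤ 1 then [q]
  else
    let k := min (n - 1) (max 0 (PySem.Int.floordiv (q - 1) Min))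
    PySem.List.pyRange q (q - (k + 1) * Min) (-Min) ++
      PySem.List.pyRange (q + Min) (q + (n - k) * Min) Min

-- ===== PRECONDITION & SPEC =====
def Spec_generate (n : Int) (p : Int) (q : Int) (out : List Int) : Prop := out = generate_alt n p q
instance (n : Int) (p : Int) (q : Int) (out : List Int) : Decidable (Spec_generate n p q out) := by unfold Spec_generate; infer_instance

-- ===== CLAIM (what is proved, stated in full; the proofs are below) =====
def Claim_equal_generate : Prop := ∀ (n : Int) (p : Int) (q : Int), Dom_generate n p q → Spec_generate n p q (generate n p q)

-- ===== LEMMAS AND PROOFS =====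

-- eligibility: s is a step candidate A's scan may break on
def Elig (n : Int) (diff : Int) (s : Int) : Prop := s ∣ diff ∧ diff < n * s

-- v is the least eligible candidate in [2, diff), or diff when there is none
def IsMinCand (n : Int) (diff : Int) (v : Int) : Prop :=
  (v = diff ∧ ∀ s, 2 ≤ s → s < diff → ¬ Elig n diff s) ∨
  (2 ≤ v ∧ v < diff ∧ Elig n diff v ∧ ∀ s, 2 ≤ s → s < v → ¬ Elig n diff s)

theorem isMinCand_unique {n diff v w : Int} (hv : IsMinCand n diff v) (hw : IsMinCand n diff w) :
    v = w := by
  rcases hv with ⟨hv1, hv2⟩ | ⟨hv1, hv2, hv3, hv4⟩ <;>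
    rcases hw with ⟨hw1, hw2⟩ | ⟨hw1, hw2, hw3, hw4⟩
  · omega
  · exact absurd hw3 (hv2 w hw1 hw2)
  · exact absurd hv3 (hw2 v hv1 hv2)
  · by_contra hne
    rcases lt_or_gt_of_ne hne with h | h
    · exact hw4 v hv1 h hv3
    · exact hv4 w hw1 h hw3

theorem genFindMin_isMinCand (n diff Min : Int) (hd : 2 < diff) (h2 : 2 ≤ Min)
    (hle : Min ≤ diff) (hpre : ∀ s, 2 ≤ s → s < Min → ¬ Elig n diff s) :
    IsMinCand n diff (genFindMin n diff Min) := by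
  rw [genFindMin]
  split
  · rename_i hlt
    split
    · rename_i hcond
      right
      have hMpos : (0:ℤ) < Min := by omega
      exact ⟨h2, hlt, ⟨(PySem.Int.mod_eq_zero_iff_dvd diff Min).1 hcond.1,
        (PySem.Int.floordiv_lt_iff_lt_mul hMpos).1 hcond.2⟩, hpre⟩
    · rename_i hcond
      apply genFindMin_isMinCand n diff (Min + 1) hd (by omega) (by omega)
      intro s hs hslt helig
      by_cases hsM : s = Min
      · subst hsM
        exact hcond ⟨(PySem.Int.mod_eq_zero_iff_dvd diff s).2 helig.1,
          (PySem.Int.floordiv_lt_iff_lt_mul (by omega)).2 helig.2⟩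
      · exact hpre s hs (by omega) helig
  · left
    refine ⟨by omega, ?_⟩
    intro s hs hslt
    exact hpre s hs (by omega)
termination_by (diff - Min).toNat
decreasing_by omega

theorem genAltFind_isMinCand (n diff d best : Int) (hd : 2 < diff) (h2 : 2 ≤ d)
    (I1 : ∀ s, 2 ≤ s → s < d → ¬ Elig n diff s)
    (I2 : best = diff ∨ (2 ≤ best ∧ best < diff ∧ Elig n diff best))
    (I3 : ∀ e, 2 ≤ e → e < d → e ∣ diff → diff < n * (diff / e) → best ≤ diff / e) :
    IsMinCand n diff (genAltFind n diff d best) := by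
  rw [genAltFind]
  split
  · rename_i hdd
    have hdpos : (0:ℤ) < d := by omega
    split
    · rename_i hmod
      have hdvd : d ∣ diff := (PySem.Int.mod_eq_zero_iff_dvd diff d).1 hmod
      split
      · rename_i hbreak
        right
        have hddiff : d < diff := by nlinarith
        exact ⟨h2, hddiff, ⟨hdvd, hbreak⟩, I1⟩
      · rename_i hnob
        rw [PySem.Int.floordiv_eq_ediv_of_pos hdpos]
        have hcd : diff / d * d = diff := Int.ediv_mul_cancel hdvd
        have hdc : d ≤ diff / d := (Int.le_ediv_iff_mul_le hdpos).2 hdd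
        have hcdiff : diff / d < diff := by nlinarith
        have hcdvd : diff / d ∣ diff := ⟨d, hcd.symm⟩
        refine genAltFind_isMinCand n diff (d + 1) _ hd (by omega) ?_ ?_ ?_
        · intro s hs hslt helig
          by_cases hsd : s = d
          · subst hsd; exact hnob helig.2
          · exact I1 s hs (by omega) helig
        · split
          · rename_i helig
            rcases min_cases best (diff / d) with ⟨hm, _⟩ | ⟨hm, _⟩ <;> rw [hm]
            · exact I2
            · exact Or.inr ⟨by omega, hcdiff, hcdvd, helig⟩
          · exact I2
        · intro e he helt hedvd hlte
          by_cases hed : e = d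
          · subst hed
            split
            · exact min_le_right best (diff / e)
            · rename_i hno; exact absurd hlte hno
          · have hold : best ≤ diff / e := I3 e he (by omega) hedvd hlte
            split
            · exact le_trans (min_le_left best (diff / d)) hold
            · exact hold
    · rename_i hmod
      refine genAltFind_isMinCand n diff (d + 1) best hd (by omega) ?_ I2 ?_
      · intro s hs hslt helig
        by_cases hsd : s = d
        · subst hsd
          exact hmod ((PySem.Int.mod_eq_zero_iff_dvd diff s).2 helig.1)
        · exact I1 s hs (by omega) helig
      · intro e he helt hedvd hlte
        by_cases hed : e = d
        · subst hed
          exact absurd ((PySem.Int.mod_eq_zero_iff_dvd diff e).2 hedvd) hmod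
        · exact I3 e he (by omega) hedvd hlte
  · rename_i hddneg
    have hdd' : diff < d * d := not_le.mp hddneg
    have sub : ∀ s, 2 ≤ s → s < diff → Elig n diff s → best ≤ s := by
      intro s hs hslt helig
      by_cases hsmall : s < d
      · exact absurd helig (I1 s hs hsmall)
      · rw [not_lt] at hsmall
        have hspos : (0:ℤ) < s := by omega
        have hes : diff / s * s = diff := Int.ediv_mul_cancel helig.1
        have he1 : 1 ≤ diff / s := by nlinarith
        have hene : diff / s ≠ 1 := by intro h1; rw [h1] at hes; omega
        have hes2 : diff / s < s := by nlinarith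
        have heed : diff / s < d := by nlinarith
        have hediv : diff / (diff / s) = s := by
          set e := diff / s with hedef
          rw [← hes]
          exact Int.mul_ediv_cancel_left s (by omega)
        have := I3 (diff / s) (by omega) heed ⟨s, by linarith [hes]⟩
          (by rw [hediv]; exact helig.2)
        rwa [hediv] at this
    rcases I2 with h | ⟨hb1, hb2, hb3⟩
    · left
      refine ⟨h, ?_⟩
      intro s hs hslt helig
      have := sub s hs hslt helig
      omega
    · right
      refine ⟨hb1, hb2, hb3, ?_⟩
      intro s hs hslt helig
      have := sub s hs (by omega) helig
      omega
termination_by (diff + 1 - d).toNat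
decreasing_by all_goals (have := pvLeMulSelf d; omega)

theorem min_eq_min (n diff : Int) :
    genFindMin n diff 2 = (if 2 < diff then genAltFind n diff 2 diff else 2) := by
  split
  · rename_i hd
    exact isMinCand_unique
      (genFindMin_isMinCand n diff 2 hd le_rfl (by omega)
        (by intro s hs hslt _; omega))
      (genAltFind_isMinCand n diff 2 diff hd le_rfl
        (by intro s hs hslt _; omega) (Or.inl rfl)
        (by intro e he helt _ _; omega))
  · rename_i hd
    rw [genFindMin, dif_neg (by omega : ¬ diff > 2)]

-- the step function of A's series loop, with the step factor abstracted
def stepA (Min : Int) (s : List Int × Bool × Int) (i : Int) : List Int × Bool × Int :=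
  if 1 ≤ PySem.List.pyGetD s.1 (i - 1) 0 - Min ∧ s.2.1 = true then
    (s.1 ++ [PySem.List.pyGetD s.1 (i - 1) 0 - Min], s.2.1, s.2.2)
  else
    (s.1 ++ [s.2.2 + Min], false, s.2.2 + Min)

theorem genFindMin_ge (n diff Min : Int) : Min ≤ genFindMin n diff Min := by
  rw [genFindMin]
  split
  · split
    · exact le_rfl
    · have := genFindMin_ge n diff (Min + 1)
      omega
  · exact le_rfl
termination_by (diff - Min).toNat
decreasing_by omega

theorem stepA_false (Min : Int) (L : List Int) (z : Int) (i : Int) :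
    stepA Min (L, false, z) i = (L ++ [z + Min], false, z + Min) := by
  simp [stepA]

theorem seriesA_inv (Min q : Int) (hM : 0 < Min) (j : Nat) :
    (PySem.List.pyRange 1 ((j : Int) + 1)).foldl (stepA Min) ([q], true, q) =
      (if (j : Int) ≤ max 0 (PySem.Int.floordiv (q - 1) Min) then
        ((List.range (j + 1)).map (fun (i : Nat) => q - (i : Int) * Min), true, q)
      else
        ((List.range ((max 0 (PySem.Int.floordiv (q - 1) Min)).toNat + 1)).map
            (fun (i : Nat) => q - (i : Int) * Min) ++
          (List.range (j - (max 0 (PySem.Int.floordiv (q - 1) Min)).toNat)).map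
            (fun (i : Nat) => q + ((i : Int) + 1) * Min),
         false, q + ((j : Int) - max 0 (PySem.Int.floordiv (q - 1) Min)) * Min)) := by
  set M := max 0 (PySem.Int.floordiv (q - 1) Min) with hMdef
  have hM0 : 0 ≤ M := le_max_left 0 _
  have hbound : ∀ i : Nat, (1 ≤ q - (i : Int) * Min - Min) ↔ ((i : Int) + 1 ≤ M) := by
    intro i
    have h1 : ((i : Int) + 1 ≤ PySem.Int.floordiv (q - 1) Min) ↔ ((i : Int) + 1) * Min ≤ q - 1 :=
      PySem.Int.le_floordiv_iff_mul_le hM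
    have hexp : ((i : Int) + 1) * Min = (i : Int) * Min + Min := by ring
    constructor
    · intro h
      have h2 : ((i : Int) + 1) * Min ≤ q - 1 := by linarith
      exact le_trans (h1.mpr h2) (le_max_right 0 _)
    · intro h
      have hfd : (i : Int) + 1 ≤ PySem.Int.floordiv (q - 1) Min := by
        rcases max_cases 0 (PySem.Int.floordiv (q - 1) Min) with ⟨hm, hm2⟩ | ⟨hm, hm2⟩
        · rw [hMdef, hm] at h; omega
        · rwa [hMdef, hm] at h
      have := h1.mp hfd
      linarith
  induction j with
  | zero =>
    rw [if_pos (by exact_mod_cast hM0)]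
    simp [List.range_one]
  | succ j ih =>
    have hr : PySem.List.pyRange 1 (((j + 1 : ℕ) : ℤ) + 1)
        = PySem.List.pyRange 1 ((j : ℤ) + 1) ++ [(j : ℤ) + 1] := by
      have h : (((j + 1 : ℕ) : ℤ) + 1) = ((j : ℤ) + 1) + 1 := by push_cast; ring
      rw [h, PySem.List.pyRange_one_succ_right (by omega)]
    rw [hr, List.foldl_append, ih]
    simp only [List.foldl_cons, List.foldl_nil]
    by_cases hc0 : (j : Int) ≤ M
    · by_cases hc1 : (j : Int) + 1 ≤ M
      · rw [if_pos hc0, if_pos (by push_cast; omega : ((j + 1 : ℕ) : ℤ) ≤ M)]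
        simp only [stepA]
        rw [show (j : ℤ) + 1 - 1 = ((j : ℕ) : ℤ) by ring]
        rw [PySem.List.pyGetD_natCast, PySem.List.getD_map_range _ _ _ _ (by omega)]
        rw [if_pos ⟨(hbound j).mpr hc1, trivial⟩]
        rw [List.range_succ (n := j + 1), List.map_append]
        simp only [List.map_cons, List.map_nil, Prod.mk.injEq]
        push_cast
        ring_nf
        exact ⟨trivial, trivial⟩
      · -- j = M: the loop switches to ascending
        have hMj : M = (j : ℤ) := by omega
        have hMt : M.toNat = j := by omega
        rw [if_pos hc0, if_neg (by push_cast; omega : ¬ ((j + 1 : ℕ) : ℤ) ≤ M)]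
        simp only [stepA]
        rw [show (j : ℤ) + 1 - 1 = ((j : ℕ) : ℤ) by ring]
        rw [PySem.List.pyGetD_natCast, PySem.List.getD_map_range _ _ _ _ (by omega)]
        rw [if_neg (fun h => absurd ((hbound j).mp h.1) (by omega))]
        rw [hMt, show j + 1 - j = 1 from by omega, List.range_one]
        simp only [List.map_cons, List.map_nil, Prod.mk.injEq]
        push_cast [hMj]
        norm_num
    · -- already ascending
      have hMt : M.toNat ≤ j := by omega
      rw [if_neg hc0, if_neg (by push_cast; omega : ¬ ((j + 1 : ℕ) : ℤ) ≤ M)]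
      rw [stepA_false]
      have hr2 : j + 1 - M.toNat = (j - M.toNat) + 1 := by omega
      rw [hr2, List.range_succ (n := j - M.toNat), List.map_append, ← List.append_assoc]
      simp only [List.map_cons, List.map_nil, Prod.mk.injEq]
      have hc : ((j - M.toNat : ℕ) : ℤ) = (j : ℤ) - M := by
        push_cast [hMt]
        omega
      refine ⟨?_, trivial, by push_cast; ring⟩
      have helem : q + ((((j - M.toNat : ℕ)) : ℤ) + 1) * Min = q + ((j : ℤ) - M) * Min + Min := by
        rw [hc]; ring
      rw [helem]

-- ===== VERDICT (by name: the statement is the Claim_ definition above) =====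
-- Python's range(q, q-(K+1)*Min, -Min) is the descending arithmetic list
theorem pyRangeDesc (q Min : Int) (K : Nat) (hM : 0 < Min) :
    PySem.List.pyRange q (q - ((K : ℤ) + 1) * Min) (-Min) =
      (List.range (K + 1)).map (fun (i : ℕ) => q - (i : Int) * Min) := by
  rw [PySem.List.pyRange_of_neg _ _ (by omega)]
  have hpos : 0 < ((K : ℤ) + 1) * Min := by positivity
  rw [if_pos (by omega)]
  have harg : q - (q - ((K : ℤ) + 1) * Min) + - -Min - 1 = (Min - 1) + ((K : ℤ) + 1) * Min := by
    ring
  rw [show (- -Min) = Min by ring] at harg ⊢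
  rw [harg, Int.add_mul_ediv_right _ _ (by omega : Min ≠ 0),
    Int.ediv_eq_zero_of_lt (by omega) (by omega)]
  rw [show ((0 : ℤ) + ((K : ℤ) + 1)).toNat = K + 1 by omega]
  exact List.map_congr_left (fun a _ => by ring)

-- Python's range(q+Min, q+(m+1)*Min, Min) is the ascending arithmetic list
theorem pyRangeAsc (q Min m : Int) (hM : 0 < Min) (hm : 0 ≤ m) :
    PySem.List.pyRange (q + Min) (q + (m + 1) * Min) Min =
      (List.range m.toNat).map (fun (i : ℕ) => q + ((i : Int) + 1) * Min) := by
  rw [PySem.List.pyRange_of_pos _ _ hM]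
  by_cases hm0 : m = 0
  · subst hm0
    rw [if_neg (by omega)]
    simp
  · have hm1 : 1 ≤ m := by omega
    have hpos : Min < (m + 1) * Min := by nlinarith
    rw [if_pos (by omega)]
    have harg : q + (m + 1) * Min - (q + Min) + Min - 1 = (Min - 1) + m * Min := by ring
    rw [harg, Int.add_mul_ediv_right _ _ (by omega : Min ≠ 0),
      Int.ediv_eq_zero_of_lt (by omega) (by omega), zero_add]
    exact List.map_congr_left (fun a _ => by ring)

theorem generate_eq_fold (n p q : Int) :
    generate n p q =
      ((PySem.List.pyRange 1 n).foldl (stepA (genFindMin n (q - p) 2)) ([q], true, q)).1 := rfl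

theorem generate_spec : Claim_equal_generate := by
  unfold Claim_equal_generate Spec_generate
  intro n p q _
  rw [generate_eq_fold]
  simp only [generate_alt]
  rw [← min_eq_min n (q - p)]
  set Min := genFindMin n (q - p) 2 with hMin
  have hM2 : 2 ≤ Min := genFindMin_ge n (q - p) 2
  by_cases hn : n ≤ 1
  · rw [if_pos hn]
    have hnil : PySem.List.pyRange 1 n = [] := by
      simp [PySem.List.pyRange]
      omega
    rw [hnil]
    rfl
  · rw [if_neg hn]
    have hj : n = ((n - 1).toNat : ℤ) + 1 := by omega
    set j := (n - 1).toNat with hjdef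
    rw [hj, seriesA_inv Min q (by omega) j]
    set M := max 0 (PySem.Int.floordiv (q - 1) Min) with hMdef
    have hM0 : 0 ≤ M := le_max_left 0 _
    by_cases hcase : (j : Int) ≤ M
    · rw [if_pos hcase]
      have hk : min ((j : ℤ) + 1 - 1) M = (j : ℤ) := by omega
      rw [hk]
      have h1 : (j : ℤ) + 1 - (j : ℤ) = 0 + 1 := by ring
      rw [h1, pyRangeDesc q Min j (by omega), pyRangeAsc q Min 0 (by omega) le_rfl]
      simp
    · rw [if_neg hcase]
      have hk : min ((j : ℤ) + 1 - 1) M = M := by omega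
      rw [hk]
      dsimp only
      have hMt : ((M.toNat : ℕ) : ℤ) = M := Int.toNat_of_nonneg hM0
      rw [show M = ((M.toNat : ℕ) : ℤ) from hMt.symm]
      rw [pyRangeDesc q Min M.toNat (by omega)]
      rw [show (j : ℤ) + 1 - ((M.toNat : ℕ) : ℤ) = ((j : ℤ) - M.toNat) + 1 by ring]
      rw [pyRangeAsc q Min ((j : ℤ) - M.toNat) (by omega) (by omega)]
      rw [show ((j : ℤ) - (M.toNat : ℕ)).toNat = j - M.toNat by omega]
      simp only [Int.toNat_natCast]
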